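-- pv_equiv track=rewrite | github.com/ithyme7/audittrail-compliance-as-code | audittrail/demo/dashboard.py | verify_integrity
-- ===== SOURCE A (Python) =====
-- def verify_integrity(traces) -> bool:
--     if not traces:
--         return False
--     prev = "0"
--     for t in traces:
--         if t.get("previous_hash") != prev:
--             return False
--         prev = t.get("hash")
--     return True
-- ===== SOURCE B (Python) =====
-- def verify_integrity(traces) -> bool:
--     def ok(xs):
--         if len(xs) < 2:
--             return True
--         return xs[1].get("previous_hash") == xs[0].get("hash") and ok(xs[1:])
--
--     return bool(traces) and traces[0].get("previous_hash") == "0" and ok(traces)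
-- ===== Notes on version B (the rewrite author's own statement) =====
-- stated objective: alternative
-- what changed: Drops the threaded prev accumulator: the genesis condition is checked separately on the head, and the chain links are verified by structural recursion on adjacent pairs (xs[1].previous_hash vs xs[0].hash).
import Mathlib
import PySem

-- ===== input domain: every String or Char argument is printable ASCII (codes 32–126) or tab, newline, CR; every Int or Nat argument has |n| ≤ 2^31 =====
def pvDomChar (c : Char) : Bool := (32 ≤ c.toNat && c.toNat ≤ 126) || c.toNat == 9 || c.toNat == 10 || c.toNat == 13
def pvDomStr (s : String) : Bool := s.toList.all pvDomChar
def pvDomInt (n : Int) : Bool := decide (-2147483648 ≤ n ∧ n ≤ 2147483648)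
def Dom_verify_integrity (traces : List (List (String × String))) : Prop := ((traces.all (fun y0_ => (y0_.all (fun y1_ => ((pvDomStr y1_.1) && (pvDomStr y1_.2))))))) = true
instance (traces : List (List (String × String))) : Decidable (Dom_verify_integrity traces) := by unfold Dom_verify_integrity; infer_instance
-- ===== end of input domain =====

-- B drops A's threaded prev accumulator: it checks the genesis condition on the head
-- separately and verifies the chain links by recursion on adjacent pairs (objective: alternative).

-- shared helper: Python dict .get(k) on an association list (first match, None if absent)
def pyGetS (d : List (String × String)) (k : String) : Option String :=
  (d.find? (fun p => p.1 == k)).map (·.2)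

-- ===== PORT A =====
def verifyLoopA (prev : Option String) : List (List (String × String)) → Bool
  | [] => true
  | t :: ts =>
    if pyGetS t "previous_hash" ≠ prev then false
    else verifyLoopA (pyGetS t "hash") ts

def verify_integrity (traces : List (List (String × String))) : Bool :=
  if traces = [] then false
  else verifyLoopA (some "0") traces

-- ===== PORT B =====
-- Source B's inner 'ok': adjacent-pair check by structural recursion
def chainOk : List (List (String × String)) → Bool
  | a :: b :: rest =>
      (pyGetS b "previous_hash" == pyGetS a "hash") && chainOk (b :: rest)
  | _ => true

def verify_integrity_alt (traces : List (List (String × String))) : Bool :=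
  match traces with
  | [] => false
  | t :: ts => (pyGetS t "previous_hash" == some "0") && chainOk (t :: ts)

-- ===== PRECONDITION & SPEC =====
def Spec_verify_integrity (traces : List (List (String × String))) (out : Bool) : Prop := out = verify_integrity_alt traces
instance (traces : List (List (String × String))) (out : Bool) : Decidable (Spec_verify_integrity traces out) := by unfold Spec_verify_integrity; infer_instance

-- ===== CLAIM =====
def Claim_equal_verify_integrity : Prop := ∀ (traces : List (List (String × String))), Dom_verify_integrity traces → Spec_verify_integrity traces (verify_integrity traces)

-- ===== LEMMAS AND PROOFS =====
-- A's threaded loop on a nonempty list = "head matches prev" plus the adjacent-pair chain check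
theorem verifyLoop_eq_chainOk (ts : List (List (String × String))) :
    ∀ (t : List (String × String)) (prev : Option String),
      verifyLoopA prev (t :: ts) =
        ((pyGetS t "previous_hash" == prev) && chainOk (t :: ts)) := by
  induction ts with
  | nil =>
    intro t prev
    by_cases h : pyGetS t "previous_hash" = prev <;>
      simp [verifyLoopA, chainOk, h]
  | cons u us ih =>
    intro t prev
    show (if pyGetS t "previous_hash" ≠ prev then false
          else verifyLoopA (pyGetS t "hash") (u :: us)) = _
    rw [ih u (pyGetS t "hash")]
    by_cases h : pyGetS t "previous_hash" = prev <;>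
      simp [chainOk, h]

-- ===== VERDICT =====
theorem verify_integrity_spec : Claim_equal_verify_integrity := by
  intro traces _
  unfold Spec_verify_integrity verify_integrity verify_integrity_alt
  cases traces with
  | nil => simp
  | cons t ts =>
    simp only [if_neg (List.cons_ne_nil t ts)]
    rw [verifyLoop_eq_chainOk]
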